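-- pv_equiv track=rewrite | github.com/lizamashchenko/automated-analog-video-supressor | analysis/eval_timing.py | split_sweeps
-- ===== SOURCE A (Python) =====
-- SWEEP_BREAK_HZ = 100_000_000
--
-- def split_sweeps(events):
--     sweeps = []
--     cur    = []
--     prev_freq = None
--
--     for ts, freq_str, freq_hz, kind in events:
--         if (freq_hz is not None and prev_freq is not None
--                 and freq_hz + SWEEP_BREAK_HZ < prev_freq):
--             sweeps.append(cur)
--             cur = []
--         cur.append((ts, freq_str, kind))
--         if freq_hz is not None:
--             prev_freq = freq_hz
--
--     if cur:
--         sweeps.append(cur)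
--
--     out = []
--     for s in sweeps:
--         if not s:
--             continue
--         out.append((s[0][0], s[-1][0], s))
--     return out
-- ===== SOURCE B (Python) =====
-- SWEEP_BREAK_HZ = 100_000_000
--
-- def split_sweeps(events):
--     # Two-pointer index scan: for each sweep, advance an end index while the
--     # break condition does not fire, then render the events[start:i] slice.
--     out = []
--     n = len(events)
--     i = 0
--     prev = None
--     while i < n:
--         start = i
--         while True:
--             fh = events[i][2]
--             if fh is not None:
--                 prev = fh
--             i += 1
--             if i >= n:
--                 break
--             nf = events[i][2]
--             if nf is not None and prev is not None and nf + SWEEP_BREAK_HZ < prev: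
--                 break
--         sweep = [(ts, fs, k) for ts, fs, _, k in events[start:i]]
--         out.append((sweep[0][0], sweep[-1][0], sweep))
--     return out
-- ===== Notes on version B (the rewrite author's own statement) =====
-- stated objective: alternative
-- what changed: B replaces A's streaming accumulator (building cur lists and a sweeps list, then a second rendering loop) by a two-pointer index scan: an inner loop advances the end index of the current sweep, and each sweep is produced directly as a slice events[start:i]; no intermediate sweeps list or cur accumulator exists.
import Mathlib
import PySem

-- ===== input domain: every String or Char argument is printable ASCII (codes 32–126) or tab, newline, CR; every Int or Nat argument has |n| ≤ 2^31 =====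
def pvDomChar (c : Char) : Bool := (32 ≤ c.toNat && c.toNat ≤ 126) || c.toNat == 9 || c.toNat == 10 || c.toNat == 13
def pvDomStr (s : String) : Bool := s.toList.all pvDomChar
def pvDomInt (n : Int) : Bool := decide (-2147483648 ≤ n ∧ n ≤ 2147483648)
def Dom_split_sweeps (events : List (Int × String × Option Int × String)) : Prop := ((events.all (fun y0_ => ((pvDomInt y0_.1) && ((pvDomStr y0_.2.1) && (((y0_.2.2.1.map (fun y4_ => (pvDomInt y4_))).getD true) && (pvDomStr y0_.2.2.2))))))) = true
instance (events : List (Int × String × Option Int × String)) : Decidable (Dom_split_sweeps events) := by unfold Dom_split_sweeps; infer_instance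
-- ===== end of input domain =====

-- B replaces A's streaming accumulator + second rendering loop by a two-pointer index scan
-- that emits each sweep directly as a mapped slice events[start:i] (objective: alternative).

-- ===== PORT A =====
-- s[0][0] / s[-1][0] on a list only used where the Python code guarantees it nonempty
def sweepTriple (s : List (Int × String × String)) : Int × Int × (List (Int × String × String)) :=
  ((s.head?.getD (0, "", "")).1, (s.getLast?.getD (0, "", "")).1, s)

-- the body of A's first loop
def stepA (st : List (List (Int × String × String)) × List (Int × String × String) × Option Int)
    (e : Int × String × Option Int × String) :
    List (List (Int × String × String)) × List (Int × String × String) × Option Int :=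
  let (sweeps, cur, prev) := st
  let (ts, fs, fh, kind) := e
  let (sweeps, cur) :=
    match fh, prev with
    | some f, some p =>
        if f + 100000000 < p then (sweeps ++ [cur], ([] : List (Int × String × String)))
        else (sweeps, cur)
    | _, _ => (sweeps, cur)
  let cur := cur ++ [(ts, fs, kind)]
  let prev := match fh with | some f => some f | none => prev
  (sweeps, cur, prev)

def split_sweeps (events : List (Int × String × Option Int × String)) : List (Int × Int × (List (Int × String × String))) :=
  let st := events.foldl stepA ([], [], none)
  let sweeps := if st.2.1 ≠ [] then st.1 ++ [st.2.1] else st.1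
  sweeps.foldl (fun out s => if s = [] then out else out ++ [sweepTriple s]) []

-- ===== PORT B =====
-- events[i] where B's Python guarantees i < len(events); the default is never read
def evAt (events : List (Int × String × Option Int × String)) (i : Nat) : Int × String × Option Int × String :=
  events.getD i (0, "", none, "")

-- B's inner `while True` loop: advance the end index of the current sweep; returns (i, prev).
-- The fuel argument only makes the loop total (events.length - i bounds its iterations).
def innerB (events : List (Int × String × Option Int × String)) :
    Nat → Nat → Option Int → Nat × Option Int
  | 0, i, prev => (i, prev)
  | fuel + 1, i, prev =>
    let fh := (evAt events i).2.2.1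
    let prev := match fh with | some f => some f | none => prev
    let i' := i + 1
    if i' < events.length then
      match (evAt events i').2.2.1, prev with
      | some nf, some p =>
          if nf + 100000000 < p then (i', prev) else innerB events fuel i' prev
      | _, _ => innerB events fuel i' prev
    else (i', prev)

-- B's outer `while i < n` loop, carrying the output accumulator (fuel again only for totality)
def outerB (events : List (Int × String × Option Int × String)) :
    Nat → Nat → Option Int → List (Int × Int × (List (Int × String × String)))
      → List (Int × Int × (List (Int × String × String)))
  | 0, _, _, out => out
  | fuel + 1, i, prev, out =>
    if i < events.length then
      let r := innerB events (events.length - i) i prev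
      let sweep := (PySem.List.slice events (some (i : Int)) (some (r.1 : Int))).map
        (fun e => (e.1, e.2.1, e.2.2.2))
      outerB events fuel r.1 r.2 (out ++ [sweepTriple sweep])
    else out

def split_sweeps_alt (events : List (Int × String × Option Int × String)) : List (Int × Int × (List (Int × String × String))) :=
  outerB events events.length 0 none []

-- ===== PRECONDITION & SPEC =====
def Spec_split_sweeps (events : List (Int × String × Option Int × String)) (out : List (Int × Int × (List (Int × String × String)))) : Prop := out = split_sweeps_alt events
instance (events : List (Int × String × Option Int × String)) (out : List (Int × Int × (List (Int × String × String)))) : Decidable (Spec_split_sweeps events out) := by unfold Spec_split_sweeps; infer_instance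

-- ===== CLAIM (what is proved, stated in full; the proofs are below) =====
def Claim_equal_split_sweeps : Prop := ∀ (events : List (Int × String × Option Int × String)), Dom_split_sweeps events → Spec_split_sweeps events (split_sweeps events)

-- ===== LEMMAS AND PROOFS =====

-- A's break test as a function (proof helper)
def brk (fh prev : Option Int) : Bool :=
  match fh, prev with
  | some f, some p => decide (f + 100000000 < p)
  | _, _ => false

-- A's prev update (proof helper)
def upd (fh prev : Option Int) : Option Int :=
  match fh with | some f => some f | none => prev

lemma innerB_le (events : List (Int × String × Option Int × String)) :
    ∀ fuel i prev, i ≤ (innerB events fuel i prev).1 := by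
  intro fuel
  induction fuel with
  | zero => intro i prev; simp [innerB]
  | succ fuel ih =>
    intro i prev
    simp only [innerB]
    repeat' split
    all_goals first
      | simp
      | exact le_trans (by omega) (ih _ _)

-- the inner loop strictly advances i (B's Python increments i before any exit)
lemma innerB_gt (events : List (Int × String × Option Int × String)) (fuel i : Nat)
    (prev : Option Int) (hf : 0 < fuel) : i < (innerB events fuel i prev).1 := by
  obtain ⟨g, rfl⟩ : ∃ g, fuel = g + 1 := ⟨fuel - 1, by omega⟩
  simp only [innerB]
  repeat' split
  all_goals first
    | simp
    | exact lt_of_lt_of_le (by omega) (innerB_le events _ _ _)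

lemma stepA_eq (s : List (List (Int × String × String))) (c : List (Int × String × String))
    (p : Option Int) (e : Int × String × Option Int × String) :
    stepA (s, c, p) e =
      ((if brk e.2.2.1 p then s ++ [c] else s),
       (if brk e.2.2.1 p then [] else c) ++ [(e.1, e.2.1, e.2.2.2)],
       upd e.2.2.1 p) := by
  obtain ⟨ts, fs, fh, kind⟩ := e
  cases fh <;> cases p <;> simp [stepA, brk, upd] <;> split_ifs <;> simp_all

-- A's second loop as a function (proof helper)
def rnd (sweeps : List (List (Int × String × String))) : List (Int × Int × (List (Int × String × String))) :=
  sweeps.foldl (fun out s => if s = [] then out else out ++ [sweepTriple s]) []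

-- the flush between A's two loops (proof helper)
def flush (st : List (List (Int × String × String)) × List (Int × String × String) × Option Int) :
    List (List (Int × String × String)) :=
  if st.2.1 ≠ [] then st.1 ++ [st.2.1] else st.1

lemma rnd_acc (l : List (List (Int × String × String))) (out : List (Int × Int × (List (Int × String × String)))) :
    l.foldl (fun out s => if s = [] then out else out ++ [sweepTriple s]) out
      = out ++ rnd l := by
  induction l generalizing out with
  | nil => simp [rnd]
  | cons x xs ih =>
    simp only [List.foldl_cons, rnd]
    rw [ih, ih (if x = [] then [] else [] ++ [sweepTriple x])]
    split_ifs <;> simp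

lemma rnd_append (a b : List (List (Int × String × String))) : rnd (a ++ b) = rnd a ++ rnd b := by
  unfold rnd
  rw [List.foldl_append, rnd_acc]; rfl

-- the sweeps component only accumulates: the fold's effect is independent of the initial sweeps
lemma fold_sweeps_shift (rest : List (Int × String × Option Int × String))
    (s : List (List (Int × String × String))) (c : List (Int × String × String)) (p : Option Int) :
    rest.foldl stepA (s, c, p)
      = (s ++ (rest.foldl stepA ([], c, p)).1, (rest.foldl stepA ([], c, p)).2) := by
  induction rest generalizing s c p with
  | nil => simp
  | cons x xs ih =>
    simp only [List.foldl_cons, stepA_eq]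
    rw [ih, ih (if brk x.2.2.1 p then [] ++ [c] else [])]
    split_ifs <;> simp

-- one sweep's worth of events, mapped as A maps them
def mapSeg (events : List (Int × String × Option Int × String)) (i j : Nat) :
    List (Int × String × String) :=
  ((events.drop i).take (j - i)).map (fun e => (e.1, e.2.1, e.2.2.2))

lemma drop_eq_evAt_cons (events : List (Int × String × Option Int × String)) {j : Nat}
    (h : j < events.length) : events.drop j = evAt events j :: events.drop (j+1) := by
  rw [List.drop_eq_getElem_cons h]
  simp [evAt, List.getD_eq_getElem?_getD, List.getElem?_eq_getElem h]

lemma mapSeg_cons (events : List (Int × String × Option Int × String)) {j r : Nat}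
    (hj : j < events.length) (hr : j < r) :
    mapSeg events j r
      = ((evAt events j).1, (evAt events j).2.1, (evAt events j).2.2.2) :: mapSeg events (j+1) r := by
  unfold mapSeg
  rw [drop_eq_evAt_cons events hj]
  have h1 : r - j = (r - (j+1)) + 1 := by omega
  rw [h1, List.take_succ_cons, List.map_cons]

-- inner loop ↔ A's fold while no break fires
lemma inner_spec (events : List (Int × String × Option Int × String)) :
    ∀ k j prev, events.length - j ≤ k → j < events.length →
      brk (evAt events j).2.2.1 prev = false →
      (∀ s c, (events.drop j).foldl stepA (s, c, prev)
          = (events.drop (innerB events k j prev).1).foldl stepA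
              (s, c ++ mapSeg events j (innerB events k j prev).1, (innerB events k j prev).2))
      ∧ (innerB events k j prev).1 ≤ events.length
      ∧ ((innerB events k j prev).1 = events.length
          ∨ brk (evAt events (innerB events k j prev).1).2.2.1 (innerB events k j prev).2 = true) := by
  intro k
  induction k with
  | zero => intro j prev hk hj hbrk; omega
  | succ k ih =>
    intro j prev hk hj hbrk
    have hdropj := drop_eq_evAt_cons events hj
    have hstep : ∀ s c, stepA (s, c, prev) (evAt events j)
        = (s, c ++ [((evAt events j).1, (evAt events j).2.1, (evAt events j).2.2.2)],
           upd (evAt events j).2.2.1 prev) := by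
      intro s c; rw [stepA_eq]; simp [hbrk]
    have hupd : (match (evAt events j).2.2.1 with | some f => some f | none => prev)
        = upd (evAt events j).2.2.1 prev := rfl
    have hseg1 : mapSeg events j (j+1)
        = [((evAt events j).1, (evAt events j).2.1, (evAt events j).2.2.2)] := by
      rw [mapSeg_cons events hj (by omega)]
      simp [mapSeg]
    by_cases h1 : j + 1 < events.length
    · by_cases h2 : brk (evAt events (j+1)).2.2.1 (upd (evAt events j).2.2.1 prev) = true
      · have hinner : innerB events (k+1) j prev = (j+1, upd (evAt events j).2.2.1 prev) := by
          simp only [innerB]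
          simp only [hupd, if_pos h1]
          revert h2
          cases hnf : (evAt events (j+1)).2.2.1 <;>
            cases hp : upd (evAt events j).2.2.1 prev <;>
            simp [brk] <;> intro h2 <;> simp [h2]
        rw [hinner]
        refine ⟨fun s c => ?_, by omega, Or.inr h2⟩
        rw [hdropj, List.foldl_cons, hstep, hseg1]
      · have hinner : innerB events (k+1) j prev
            = innerB events k (j+1) (upd (evAt events j).2.2.1 prev) := by
          simp only [innerB]
          simp only [hupd, if_pos h1]
          revert h2
          cases hnf : (evAt events (j+1)).2.2.1 <;>
            cases hp : upd (evAt events j).2.2.1 prev <;>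
            simp [brk] <;> intro h2 <;> simp [h2]
        have h2' : brk (evAt events (j+1)).2.2.1 (upd (evAt events j).2.2.1 prev) = false := by
          simp only [Bool.not_eq_true] at h2; exact h2
        have hrec := ih (j+1) (upd (evAt events j).2.2.1 prev) (by omega) h1 h2'
        have hgt := innerB_gt events k (j+1) (upd (evAt events j).2.2.1 prev) (by omega)
        rw [hinner]
        refine ⟨fun s c => ?_, hrec.2.1, hrec.2.2⟩
        rw [hdropj, List.foldl_cons, hstep, hrec.1 s _,
          mapSeg_cons events hj (by omega), List.append_cons]
        simp
    · have hinner : innerB events (k+1) j prev = (j+1, upd (evAt events j).2.2.1 prev) := by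
        simp only [innerB]
        simp only [hupd, if_neg h1]
      rw [hinner]
      refine ⟨fun s c => ?_, by omega, Or.inl (by omega)⟩
      rw [hdropj, List.foldl_cons, hstep, hseg1]

-- the inner loop from a sweep's first event (which B consumes unconditionally) ↔ A's fold
lemma inner_full (events : List (Int × String × Option Int × String)) (i : Nat) (prev : Option Int)
    (hi : i < events.length) :
    (∀ s c, (events.drop (i+1)).foldl stepA
          (s, c ++ [((evAt events i).1, (evAt events i).2.1, (evAt events i).2.2.2)],
           upd (evAt events i).2.2.1 prev)
        = (events.drop (innerB events (events.length - i) i prev).1).foldl stepA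
            (s, c ++ mapSeg events i (innerB events (events.length - i) i prev).1, (innerB events (events.length - i) i prev).2))
    ∧ (innerB events (events.length - i) i prev).1 ≤ events.length
    ∧ ((innerB events (events.length - i) i prev).1 = events.length
        ∨ brk (evAt events (innerB events (events.length - i) i prev).1).2.2.1 (innerB events (events.length - i) i prev).2 = true) := by
  obtain ⟨G, hG⟩ : ∃ G, events.length - i = G + 1 := ⟨events.length - i - 1, by omega⟩
  have hupd : (match (evAt events i).2.2.1 with | some f => some f | none => prev)
      = upd (evAt events i).2.2.1 prev := rfl
  have hseg1 : mapSeg events i (i+1)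
      = [((evAt events i).1, (evAt events i).2.1, (evAt events i).2.2.2)] := by
    rw [mapSeg_cons events hi (by omega)]
    simp [mapSeg]
  by_cases h1 : i + 1 < events.length
  · by_cases h2 : brk (evAt events (i+1)).2.2.1 (upd (evAt events i).2.2.1 prev) = true
    · have hinner : innerB events (events.length - i) i prev = (i+1, upd (evAt events i).2.2.1 prev) := by
        rw [hG]; simp only [innerB]
        simp only [hupd, if_pos h1]
        revert h2
        cases hnf : (evAt events (i+1)).2.2.1 <;>
          cases hp : upd (evAt events i).2.2.1 prev <;>
          simp [brk] <;> intro h2 <;> simp [h2]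
      rw [hinner, hseg1]
      exact ⟨fun s c => rfl, by omega, Or.inr h2⟩
    · have hinner : innerB events (events.length - i) i prev
          = innerB events G (i+1) (upd (evAt events i).2.2.1 prev) := by
        rw [hG]; simp only [innerB]
        simp only [hupd, if_pos h1]
        revert h2
        cases hnf : (evAt events (i+1)).2.2.1 <;>
          cases hp : upd (evAt events i).2.2.1 prev <;>
          simp [brk] <;> intro h2 <;> simp [h2]
      have h2' : brk (evAt events (i+1)).2.2.1 (upd (evAt events i).2.2.1 prev) = false := by
        simp only [Bool.not_eq_true] at h2; exact h2
      have hrec := inner_spec events G (i+1)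
        (upd (evAt events i).2.2.1 prev) (by omega) h1 h2'
      have hgt := innerB_gt events G (i+1) (upd (evAt events i).2.2.1 prev) (by omega)
      rw [hinner]
      refine ⟨fun s c => ?_, hrec.2.1, hrec.2.2⟩
      rw [hrec.1 s _, mapSeg_cons events hi (by omega), List.append_cons]
      simp
  · have hinner : innerB events (events.length - i) i prev = (i+1, upd (evAt events i).2.2.1 prev) := by
      rw [hG]; simp only [innerB]
      simp only [hupd, if_neg h1]
    rw [hinner, hseg1]
    exact ⟨fun s c => rfl, by omega, Or.inl (by omega)⟩

lemma rnd_flush_append (a : List (List (Int × String × String)))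
    (w : List (List (Int × String × String)) × List (Int × String × String) × Option Int) :
    rnd (flush (a ++ w.1, w.2)) = rnd a ++ rnd (flush w) := by
  unfold flush
  split_ifs with h <;> simp_all [rnd_append, List.append_assoc]

-- finishing one sweep: rendering the rest of A's fold emits the closed sweep first
lemma emit_sweep (events : List (Int × String × Option Int × String)) (r1 : Nat)
    (s0 : List (List (Int × String × String))) (cur : List (Int × String × String)) (p : Option Int)
    (hcur : cur ≠ []) (hr1 : r1 ≤ events.length)
    (hend : r1 = events.length ∨ brk (evAt events r1).2.2.1 p = true) :
    rnd (flush ((events.drop r1).foldl stepA (s0, cur, p)))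
      = rnd s0 ++ [sweepTriple cur] ++ rnd (flush ((events.drop r1).foldl stepA ([], [], p))) := by
  by_cases hlen : r1 = events.length
  · rw [hlen, List.drop_length]
    simp only [List.foldl_nil]
    unfold flush
    simp [hcur, rnd]
  · have hlt : r1 < events.length := by omega
    have hbrk : brk (evAt events r1).2.2.1 p = true := by tauto
    rw [drop_eq_evAt_cons events hlt, List.foldl_cons, List.foldl_cons, stepA_eq, stepA_eq]
    simp only [hbrk, if_true]
    rw [fold_sweeps_shift, fold_sweeps_shift _ ([] ++ [[]])]
    rw [rnd_flush_append, rnd_flush_append]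
    have h1 : rnd ([] ++ [([] : List (Int × String × String))]) = [] := by simp [rnd]
    rw [h1]
    rw [rnd_append]
    have h2 : rnd [cur] = [sweepTriple cur] := by simp [rnd, hcur]
    rw [h2]
    simp [List.append_assoc]

-- outer loop ↔ rendered flush of A's fold
lemma outer_spec (events : List (Int × String × Option Int × String)) :
    ∀ k i prev out, events.length - i ≤ k →
      outerB events k i prev out
        = out ++ rnd (flush ((events.drop i).foldl stepA ([], [], prev))) := by
  intro k
  induction k with
  | zero =>
    intro i prev out hk
    have hge : events.length ≤ i := by omega
    simp only [outerB]
    rw [List.drop_eq_nil_of_le hge]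
    simp [flush, rnd]
  | succ k ih =>
    intro i prev out hk
    by_cases hi : i < events.length
    · have hgt := innerB_gt events (events.length - i) i prev (by omega)
      have hf := inner_full events i prev hi
      have hcur : mapSeg events i (innerB events (events.length - i) i prev).1 ≠ [] := by
        rw [mapSeg_cons events hi hgt]; simp
      have hsw : (PySem.List.slice events (some (i : Int)) (some ((innerB events (events.length - i) i prev).1 : Int))).map
            (fun e => (e.1, e.2.1, e.2.2.2)) = mapSeg events i (innerB events (events.length - i) i prev).1 := by
        rw [PySem.List.slice_natCast]; rfl
      simp only [outerB]
      simp only [if_pos hi, hsw]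
      rw [ih _ _ _ (by omega)]
      -- now compute the RHS: one step of A's fold, then the whole sweep, then emit it
      rw [drop_eq_evAt_cons events hi, List.foldl_cons, stepA_eq]
      simp only [List.nil_append, ite_self]
      have hs0 : rnd (if brk (evAt events i).2.2.1 prev then [([] : List (Int × String × String))] else []) = [] := by
        split_ifs <;> simp [rnd]
      rw [show [((evAt events i).1, (evAt events i).2.1, (evAt events i).2.2.2)]
          = [] ++ [((evAt events i).1, (evAt events i).2.1, (evAt events i).2.2.2)] by simp]
      rw [hf.1]
      simp only [List.nil_append]
      rw [emit_sweep events (innerB events (events.length - i) i prev).1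
        (if brk (evAt events i).2.2.1 prev = true then [[]] else [])
        (mapSeg events i (innerB events (events.length - i) i prev).1) (innerB events (events.length - i) i prev).2
        hcur hf.2.1 hf.2.2]
      rw [hs0]
      simp [List.append_assoc]
    · simp only [outerB]
      rw [List.drop_eq_nil_of_le (by omega)]
      simp [flush, rnd, hi]

-- ===== VERDICT (by name: the statement is the Claim_ definition above) =====
theorem split_sweeps_spec : Claim_equal_split_sweeps := by
  intro events _
  unfold Spec_split_sweeps split_sweeps split_sweeps_alt
  have h := outer_spec events events.length 0 none [] (by omega)
  rw [h]
  simp [rnd, flush]
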